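-- pv_equiv track=rewrite | github.com/haodi19/TrajSeg | inference_ytvos_uniform.py | split_video_frames
-- ===== SOURCE A (Python) =====
-- def split_video_frames(total_frames, frames_per_group):
--     # 初始化最佳步长和其对应的最大分组长度差值
--     best_step = 1
--     min_diff = float('inf')
--
--     # 从1开始尝试每个步长，直到 total_frames
--     for step in range(1, total_frames + 1):
--         # 计算这个步长下最大的分组长度
--         max_group_size = (total_frames - 1) // step + 1
--
--         # 如果最大分组长度大于 frames_per_group，则不考虑这个步长
--         if max_group_size > frames_per_group:
--             continue
--
--         # 计算与 frames_per_group 的差异，尽量使分组长度接近 frames_per_group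
--         diff = frames_per_group - max_group_size
--
--         # 更新最佳步长
--         if diff < min_diff:
--             min_diff = diff
--             best_step = step
--
--     # 使用最佳步长进行分组
--     groups = []
--     for start in range(best_step):
--         group = list(range(start, total_frames, best_step))
--         if len(group) > frames_per_group:
--             group = group[:frames_per_group]
--         if group:
--             groups.append(group)
--
--     return groups
-- ===== SOURCE B (Python) =====
-- def split_video_frames(total_frames, frames_per_group):
--     # closed-form best step: smallest step with (total_frames-1)//step + 1 <= frames_per_group
--     if total_frames >= 1 and frames_per_group >= 1:
--         best_step = (total_frames - 1) // frames_per_group + 1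
--     else:
--         best_step = 1
--     groups = []
--     for start in range(best_step):
--         group = list(range(start, total_frames, best_step))[:frames_per_group]
--         if group:
--             groups.append(group)
--     return groups
-- ===== Notes on version B (the rewrite author's own statement) =====
-- stated objective: faster
-- what changed: A's O(total_frames) linear search for the smallest step with (total_frames-1)//step+1 <= frames_per_group is replaced by the closed form (total_frames-1)//frames_per_group + 1 (with best_step = 1 when total_frames < 1 or frames_per_group < 1, where no valid step exists); the group-building loop is kept and slices unconditionally.
import Mathlib
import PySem

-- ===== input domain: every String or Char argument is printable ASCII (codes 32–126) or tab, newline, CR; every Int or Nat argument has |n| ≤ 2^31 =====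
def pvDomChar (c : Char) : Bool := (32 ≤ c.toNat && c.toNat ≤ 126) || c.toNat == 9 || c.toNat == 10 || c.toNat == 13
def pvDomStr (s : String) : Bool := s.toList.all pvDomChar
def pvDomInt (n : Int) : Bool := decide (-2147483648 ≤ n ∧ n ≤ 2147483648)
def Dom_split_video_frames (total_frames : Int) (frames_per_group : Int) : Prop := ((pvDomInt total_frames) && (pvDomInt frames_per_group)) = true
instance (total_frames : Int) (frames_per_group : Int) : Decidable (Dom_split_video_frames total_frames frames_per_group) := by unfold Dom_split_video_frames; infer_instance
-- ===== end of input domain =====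

-- B replaces A's linear search for the best step by a closed-form formula (simpler, and
-- asymptotically faster in total_frames for the search phase); the group-building loop is kept.

-- ===== PORT A =====
-- one iteration of A's search loop; min_diff = float('inf') is 'none'
def pvAStep (total_frames frames_per_group : Int) (st : Int × Option Int) (step : Int) :
    Int × Option Int :=
  let max_group_size := PySem.Int.floordiv (total_frames - 1) step + 1
  if max_group_size > frames_per_group then st
  else
    let diff := frames_per_group - max_group_size
    match st.2 with
    | none => (step, some diff)
    | some m => if diff < m then (step, some diff) else st

-- one iteration of A's group-building loop
def pvAGroup (total_frames frames_per_group best_step : Int)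
    (groups : List (List Int)) (start : Int) : List (List Int) :=
  let group := PySem.List.pyRange start total_frames best_step
  let group := if (group.length : Int) > frames_per_group
               then PySem.List.slice group none (some frames_per_group) else group
  if group ≠ [] then groups ++ [group] else groups

def split_video_frames (total_frames : Int) (frames_per_group : Int) : List (List Int) :=
  let st := (PySem.List.pyRange 1 (total_frames + 1) 1).foldl
              (pvAStep total_frames frames_per_group) (1, none)
  let best_step := st.1
  (PySem.List.pyRange 0 best_step 1).foldl
    (pvAGroup total_frames frames_per_group best_step) []

-- ===== PORT B =====
def pvBGroup (total_frames frames_per_group best_step : Int)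
    (groups : List (List Int)) (start : Int) : List (List Int) :=
  let group := PySem.List.slice (PySem.List.pyRange start total_frames best_step)
                 none (some frames_per_group)
  if group ≠ [] then groups ++ [group] else groups

def split_video_frames_alt (total_frames : Int) (frames_per_group : Int) : List (List Int) :=
  let best_step := if 1 ≤ total_frames ∧ 1 ≤ frames_per_group
                   then PySem.Int.floordiv (total_frames - 1) frames_per_group + 1 else 1
  (PySem.List.pyRange 0 best_step 1).foldl
    (pvBGroup total_frames frames_per_group best_step) []

-- ===== PRECONDITION & SPEC =====
def Spec_split_video_frames (total_frames : Int) (frames_per_group : Int) (out : List (List Int)) : Prop := out = split_video_frames_alt total_frames frames_per_group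
instance (total_frames : Int) (frames_per_group : Int) (out : List (List Int)) : Decidable (Spec_split_video_frames total_frames frames_per_group out) := by unfold Spec_split_video_frames; infer_instance

-- ===== CLAIM (what is proved, stated in full; the proofs are below) =====
def Claim_equal_split_video_frames : Prop := ∀ (total_frames : Int) (frames_per_group : Int), Dom_split_video_frames total_frames frames_per_group → Spec_split_video_frames total_frames frames_per_group (split_video_frames total_frames frames_per_group)

-- ===== LEMMAS AND PROOFS =====

-- the two group-building steps agree (unconditional [:f] = A's conditional [:f])
theorem pvGroupVal (t f b s : Int) :
    (if ((PySem.List.pyRange s t b).length : Int) > f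
     then PySem.List.slice (PySem.List.pyRange s t b) none (some f)
     else PySem.List.pyRange s t b)
      = PySem.List.slice (PySem.List.pyRange s t b) none (some f) := by
  split_ifs with h
  · rfl
  · rw [not_lt] at h
    have hf : 0 ≤ f := le_trans (by positivity) h
    rw [PySem.List.slice_to _ hf, List.take_of_length_le (by omega)]

theorem pvGroup_eq (t f b : Int) (gs : List (List Int)) (s : Int) :
    pvAGroup t f b gs s = pvBGroup t f b gs s := by
  unfold pvAGroup pvBGroup
  dsimp only
  rw [pvGroupVal]

-- A's search loop never changes a state (1, none) while scanning steps below the first valid one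
theorem pvLoop_none (t f : Int) (ht : 1 ≤ t)
    (k m : Int) (hk : 1 ≤ k)
    (hinv : ∀ s : Int, 1 ≤ s → s < m → f < PySem.Int.floordiv (t - 1) s + 1) :
    (PySem.List.pyRange k m 1).foldl (pvAStep t f) (1, none) = (1, none) := by
  by_cases hkm : k < m
  · rw [PySem.List.pyRange_one_cons hkm]
    simp only [List.foldl_cons]
    have hstep : pvAStep t f (1, none) k = (1, none) := by
      unfold pvAStep
      simp only [gt_iff_lt]
      rw [if_pos (hinv k hk hkm)]
    rw [hstep]
    exact pvLoop_none t f ht (k + 1) m (by omega) hinv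
  · rw [PySem.List.pyRange_one_eq_nil (by omega)]
    rfl
termination_by (m - k).toNat
decreasing_by omega

-- once the state is (s0, some (f - mgs s0)), later steps never change it
theorem pvLoop_some (t f : Int) (ht : 1 ≤ t) (s0 : Int) (hs0 : 1 ≤ s0)
    (k m : Int) (hk : s0 ≤ k)
    (d0 : Int) (hd0 : d0 = f - (PySem.Int.floordiv (t - 1) s0 + 1)) :
    (PySem.List.pyRange k m 1).foldl (pvAStep t f) (s0, some d0) = (s0, some d0) := by
  by_cases hkm : k < m
  · rw [PySem.List.pyRange_one_cons hkm]
    simp only [List.foldl_cons]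
    have hstep : pvAStep t f (s0, some d0) k = (s0, some d0) := by
      unfold pvAStep
      simp only [gt_iff_lt]
      by_cases hval : f < PySem.Int.floordiv (t - 1) k + 1
      · rw [if_pos hval]
      · rw [if_neg hval]
        -- mgs is antitone in the step, so diff(k) ≥ d0
        have hq : PySem.Int.floordiv (t - 1) k ≤ PySem.Int.floordiv (t - 1) s0 := by
          have hk1 : (1:Int) ≤ k := by omega
          have h1 : PySem.Int.floordiv (t - 1) k * k ≤ t - 1 :=
            (PySem.Int.le_floordiv_iff_mul_le (by omega)).mp le_rfl
          have h2 : 0 ≤ PySem.Int.floordiv (t - 1) k :=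
            (PySem.Int.le_floordiv_iff_mul_le (by omega)).mpr (by nlinarith)
          refine (PySem.Int.le_floordiv_iff_mul_le (by omega)).mpr ?_
          nlinarith
        have : ¬ f - (PySem.Int.floordiv (t - 1) k + 1) < d0 := by omega
        simp only [this, if_false]
    rw [hstep]
    exact pvLoop_some t f ht s0 hs0 (k + 1) m (by omega) d0 hd0
  · rw [PySem.List.pyRange_one_eq_nil (by omega)]
    rfl
termination_by (m - k).toNat
decreasing_by omega

-- the full search loop yields B's closed-form best step
theorem pvBest_eq (t f : Int) :
    ((PySem.List.pyRange 1 (t + 1) 1).foldl (pvAStep t f) (1, none)).1 =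
      (if 1 ≤ t ∧ 1 ≤ f then PySem.Int.floordiv (t - 1) f + 1 else 1) := by
  by_cases ht : 1 ≤ t
  · by_cases hf : 1 ≤ f
    · set s0 := PySem.Int.floordiv (t - 1) f + 1 with hs0def
      have hq0 : 0 ≤ PySem.Int.floordiv (t - 1) f :=
        (PySem.Int.le_floordiv_iff_mul_le (by omega)).mpr (by nlinarith)
      have hqle : PySem.Int.floordiv (t - 1) f * f ≤ t - 1 :=
        (PySem.Int.le_floordiv_iff_mul_le (by omega)).mp le_rfl
      have hqlt : t - 1 < (PySem.Int.floordiv (t - 1) f + 1) * f :=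
        (PySem.Int.floordiv_lt_iff_lt_mul (by omega)).mp (by omega)
      have hs0t : s0 ≤ t := by nlinarith
      rw [PySem.List.pyRange_one_append 1 s0 (t + 1) (by omega) (by omega),
          List.foldl_append,
          pvLoop_none t f ht 1 s0 (by omega)
            (fun s hs1 hss0 => by
              -- steps below s0 are invalid: mgs > f
              have : f * s ≤ t - 1 := by nlinarith
              have := (PySem.Int.le_floordiv_iff_mul_le (show (0:Int) < s by omega)).mpr this
              omega),
          PySem.List.pyRange_one_cons (by omega)]
      simp only [List.foldl_cons]
      have hvalid : ¬ f < PySem.Int.floordiv (t - 1) s0 + 1 := by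
        have : PySem.Int.floordiv (t - 1) s0 < f :=
          (PySem.Int.floordiv_lt_iff_lt_mul (by omega)).mpr (by nlinarith)
        omega
      have hstep : pvAStep t f (1, none) s0 =
          (s0, some (f - (PySem.Int.floordiv (t - 1) s0 + 1))) := by
        unfold pvAStep
        simp only [gt_iff_lt]
        rw [if_neg hvalid]
      rw [hstep, pvLoop_some t f ht s0 (by omega) (s0 + 1) (t + 1) (by omega) _ rfl,
          if_pos ⟨ht, hf⟩]
    · -- frames_per_group < 1: every step is invalid, state stays (1, none)
      rw [pvLoop_none t f ht 1 (t + 1) le_rfl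
            (fun s hs1 _ => by
              have : 0 ≤ PySem.Int.floordiv (t - 1) s :=
                (PySem.Int.le_floordiv_iff_mul_le (by omega)).mpr (by nlinarith)
              omega),
          if_neg (by omega)]
  · rw [PySem.List.pyRange_one_eq_nil (by omega), if_neg (by omega)]
    rfl

-- ===== VERDICT (by name: the statement is the Claim_ definition above) =====
theorem split_video_frames_spec : Claim_equal_split_video_frames := by
  intro t f _
  show split_video_frames t f = split_video_frames_alt t f
  unfold split_video_frames split_video_frames_alt
  dsimp only
  rw [pvBest_eq t f]
  exact PySem.List.foldl_congr_mem _ _ _ _ (fun acc x _ => pvGroup_eq t f _ acc x)
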